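-- pv_equiv track=rewrite | github.com/q-inho/qave | backend/src/qave_backend/simulator/backend_a.py | _outcome_index_from_label
-- ===== SOURCE A (Python) =====
-- def _outcome_index_from_label(label: str, fallback: int) -> int:
--     """Parse a binary outcome label, falling back on invalid input."""
--     if not label:
--         return fallback
--     if any(bit not in {"0", "1"} for bit in label):
--         return fallback
--     try:
--         return int(label, 2)
--     except ValueError:
--         return fallback
-- ===== SOURCE B (Python) =====
-- def _outcome_index_from_label(label: str, fallback: int) -> int:
--     if not label:
--         return fallback
--     result = 0
--     for ch in label:
--         if ch == "1":
--             result = result * 2 + 1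
--         elif ch == "0":
--             result = result * 2
--         else:
--             return fallback
--     return result
-- ===== Notes on version B (the rewrite author's own statement) =====
-- stated objective: simpler
-- what changed: Replaced the two-phase validate-then-int(label,2) with a single Horner-style pass that accumulates result=result*2+bit and returns fallback on the first invalid character, dropping the set membership scan and the try/except.
import Mathlib
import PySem

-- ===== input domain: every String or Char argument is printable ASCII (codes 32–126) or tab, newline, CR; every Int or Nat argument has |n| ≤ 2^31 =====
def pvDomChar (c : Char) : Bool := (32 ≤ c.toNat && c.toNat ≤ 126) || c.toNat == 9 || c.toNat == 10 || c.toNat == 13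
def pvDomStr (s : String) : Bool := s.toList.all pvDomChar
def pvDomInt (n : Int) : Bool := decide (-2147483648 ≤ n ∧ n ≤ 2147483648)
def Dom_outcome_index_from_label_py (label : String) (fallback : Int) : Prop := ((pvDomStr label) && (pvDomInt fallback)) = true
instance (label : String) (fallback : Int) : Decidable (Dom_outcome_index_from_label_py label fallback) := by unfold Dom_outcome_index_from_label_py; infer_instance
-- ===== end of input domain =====

-- B replaces A's validate-then-int(label,2) with one Horner pass that bails out on the first invalid character (objective: simpler).

-- ===== PORT A =====
-- int(label, 2) on an all-'0'/'1' nonempty string (the only case A reaches it; ValueError cannot occur there):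
def pvBin2 (cs : List Char) : Int :=
  cs.foldl (fun a c => a * 2 + (if c = '1' then 1 else 0)) 0

def outcome_index_from_label_py (label : String) (fallback : Int) : Int :=
  if label.toList = [] then fallback
  else if label.toList.any (fun c => !(c = '0' || c = '1')) then fallback
  else pvBin2 label.toList

-- ===== PORT B =====
-- the for-loop with early return: none = the early `return fallback`
def pvHorner : List Char → Int → Option Int
  | [], acc => some acc
  | c :: cs, acc =>
      if c = '1' then pvHorner cs (acc * 2 + 1)
      else if c = '0' then pvHorner cs (acc * 2)
      else none

def outcome_index_from_label_py_alt (label : String) (fallback : Int) : Int :=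
  if label.toList = [] then fallback
  else match pvHorner label.toList 0 with
       | some r => r
       | none => fallback

-- ===== PRECONDITION & SPEC =====
def Spec_outcome_index_from_label_py (label : String) (fallback : Int) (out : Int) : Prop := out = outcome_index_from_label_py_alt label fallback
instance (label : String) (fallback : Int) (out : Int) : Decidable (Spec_outcome_index_from_label_py label fallback out) := by unfold Spec_outcome_index_from_label_py; infer_instance

-- ===== CLAIM (what is proved, stated in full; the proofs are below) =====
def Claim_equal_outcome_index_from_label_py : Prop := ∀ (label : String) (fallback : Int), Dom_outcome_index_from_label_py label fallback → Spec_outcome_index_from_label_py label fallback (outcome_index_from_label_py label fallback)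

-- ===== LEMMAS AND PROOFS =====
lemma pvHorner_valid (cs : List Char) (acc : Int)
    (h : cs.all (fun c => c = '0' || c = '1') = true) :
    pvHorner cs acc = some (cs.foldl (fun a c => a * 2 + (if c = '1' then 1 else 0)) acc) := by
  induction cs generalizing acc with
  | nil => rfl
  | cons c cs ih =>
    simp only [List.all_cons, Bool.and_eq_true] at h
    obtain ⟨hc, hcs⟩ := h
    simp only [pvHorner, List.foldl_cons]
    rcases Bool.or_eq_true_iff.mp hc with h0 | h1
    · have : c = '0' := by exact decide_eq_true_eq.mp h0
      subst this
      simp [ih _ hcs]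
    · have : c = '1' := by exact decide_eq_true_eq.mp h1
      subst this
      simp [ih _ hcs]

lemma pvHorner_invalid (cs : List Char) (acc : Int)
    (h : cs.any (fun c => !(c = '0' || c = '1')) = true) :
    pvHorner cs acc = none := by
  induction cs generalizing acc with
  | nil => simp at h
  | cons c cs ih =>
    simp only [List.any_cons, Bool.or_eq_true] at h
    by_cases h1 : c = '1'
    · subst h1
      simp only [pvHorner, reduceIte]
      rcases h with hbad | hrest
      · simp at hbad
      · exact ih _ hrest
    · by_cases h0 : c = '0'
      · subst h0
        simp only [pvHorner]
        rw [if_neg (by decide)]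
        simp only [if_true]
        rcases h with hbad | hrest
        · simp at hbad
        · exact ih _ hrest
      · simp only [pvHorner, if_neg h1, if_neg h0]

-- ===== VERDICT (by name: the statement is the Claim_ definition above) =====
theorem outcome_index_from_label_py_spec : Claim_equal_outcome_index_from_label_py := by
  intro label fallback _
  unfold Spec_outcome_index_from_label_py outcome_index_from_label_py outcome_index_from_label_py_alt
  by_cases hemp : label.toList = []
  · simp [hemp]
  · simp only [if_neg hemp]
    by_cases hbad : label.toList.any (fun c => !(c = '0' || c = '1')) = true
    · rw [if_pos hbad, pvHorner_invalid _ _ hbad]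
    · rw [if_neg hbad]
      have hall : label.toList.all (fun c => c = '0' || c = '1') = true := by
        rw [List.all_eq_not_any_not]
        simpa using hbad
      rw [pvHorner_valid _ _ hall]
      rfl
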